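-- pv_equiv track=rewrite | github.com/brightappsllc/varys-ai | varys/handlers/changelog.py | _slice_since
-- ===== SOURCE A (Python) =====
-- def _semver_tuple(v: str) -> tuple:
--     try:
--         return tuple(int(x) for x in v.lstrip("v").split(".")[:3])
--     except Exception:
--         return (0, 0, 0)
--
-- def _slice_since(content: str, since: str, inclusive: bool = False) -> str:
--     """Return changelog sections newer than *since* (or from *since* when inclusive=True).
--
--     Sections are identified by lines starting with '## ['.
--     If *since* is not found, the entire content is returned.
--
--     inclusive=True  → include the section whose version == since (used by "What's New"
--                        so the current version's own changes are always visible).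
--     inclusive=False → strictly newer (used by the update-available badge path).
--     """
--     if not since:
--         return content
--
--     since_t = _semver_tuple(since)
--     lines = content.splitlines(keepends=True)
--     result_lines: list[str] = []
--     in_header_block = True  # preamble before first ## section
--
--     for line in lines:
--         stripped = line.strip()
--         # Detect a version section header: ## [0.7.0] — ...
--         if stripped.startswith("## [") and "]" in stripped:
--             try:
--                 ver_str = stripped[4:stripped.index("]")]
--                 ver_t = _semver_tuple(ver_str)
--             except Exception:
--                 ver_t = (0, 0, 0)
--
--             in_header_block = False
--             keep = (ver_t >= since_t) if inclusive else (ver_t > since_t)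
--             if keep:
--                 result_lines.append(line)
--             else:
--                 # We've hit a version older than the cutoff — stop
--                 break
--         elif in_header_block:
--             pass  # drop the preamble for the sliced view
--         else:
--             result_lines.append(line)
--
--     return "".join(result_lines).strip()
-- ===== SOURCE B (Python) =====
-- def _semver_tuple(v: str) -> tuple:
--     try:
--         return tuple(int(x) for x in v.lstrip("v").split(".")[:3])
--     except Exception:
--         return (0, 0, 0)
--
-- def _header_version(line):
--     """Version tuple of a '## [...]' header line, or None for any other line."""
--     s = line.strip()
--     if s.startswith("## [") and "]" in s:
--         return _semver_tuple(s[4:s.index("]")])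
--     return None
--
-- def _cmp(a, b):
--     """Three-way lexicographic comparison of two int tuples (Python tuple order)."""
--     for x, y in zip(a, b):
--         if x < y:
--             return -1
--         if x > y:
--             return 1
--     return (len(a) > len(b)) - (len(a) < len(b))
--
-- def _drop_preamble(lines):
--     while lines and _header_version(lines[0]) is None:
--         lines = lines[1:]
--     return lines
--
-- def _take_while_kept(lines, cut, inclusive):
--     kept = []
--     for line in lines:
--         v = _header_version(line)
--         if v is not None:
--             c = _cmp(v, cut)
--             if (c < 0) if inclusive else (c <= 0):
--                 break
--         kept.append(line)
--     return kept
--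
-- def _slice_since(content: str, since: str, inclusive: bool = False) -> str:
--     if not since:
--         return content
--     cut = _semver_tuple(since)
--     lines = content.splitlines(keepends=True)
--     kept = _take_while_kept(_drop_preamble(lines), cut, inclusive)
--     return "".join(kept).strip()
-- ===== Notes on version B (the rewrite author's own statement) =====
-- stated objective: alternative
-- what changed: B replaces A's single stateful line loop (in_header_block flag, per-line append/break) with two staged passes - drop the preamble up to the first header, then take whole lines while no failing header is met - using a three-way tuple comparator instead of Python's tuple ordering operators.
import Mathlib
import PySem

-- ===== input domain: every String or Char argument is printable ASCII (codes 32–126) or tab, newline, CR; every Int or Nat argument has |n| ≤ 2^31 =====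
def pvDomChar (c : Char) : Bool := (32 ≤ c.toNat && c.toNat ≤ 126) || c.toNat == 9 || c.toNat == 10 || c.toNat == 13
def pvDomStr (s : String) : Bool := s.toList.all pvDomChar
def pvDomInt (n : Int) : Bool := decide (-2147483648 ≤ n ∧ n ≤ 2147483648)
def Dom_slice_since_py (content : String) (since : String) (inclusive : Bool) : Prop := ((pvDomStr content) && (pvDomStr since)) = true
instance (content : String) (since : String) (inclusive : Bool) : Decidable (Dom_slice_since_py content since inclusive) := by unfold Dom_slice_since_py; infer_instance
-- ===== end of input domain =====

-- B replaces A's single stateful line loop with two staged passes (drop preamble, then take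
-- lines until a failing header) using a three-way version comparator; alternative decomposition, same cost.

-- ===== PORT A =====
-- content.splitlines(keepends=True): exact on the stated domain, where the only line breaks are '\n', '\r', '\r\n'
-- (other Python line-break characters are outside Dom_). Shared by both ports (module-level behaviour of splitlines).
def pvSplitKeep : List Char → List Char → List (List Char)
  | [], acc => if acc.isEmpty then [] else [acc.reverse]
  | '\r' :: '\n' :: rest, acc => (acc.reverse ++ ['\r', '\n']) :: pvSplitKeep rest []
  | '\r' :: rest, acc => (acc.reverse ++ ['\r']) :: pvSplitKeep rest []
  | '\n' :: rest, acc => (acc.reverse ++ ['\n']) :: pvSplitKeep rest []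
  | c :: rest, acc => pvSplitKeep rest (c :: acc)

-- _semver_tuple: int() applied to the first three '.'-separated pieces of v.lstrip("v"); any ValueError → (0,0,0).
-- A module-level helper called by both A and B.
def pvSemver (v : List Char) : List Int :=
  match ((PySem.Chars.splitOn (v.dropWhile (· == 'v')) ['.']).take 3).mapM PySem.Int.ofChars? with
  | some ts => ts
  | none => [0, 0, 0]

-- Python's `<` on tuples of ints (lexicographic, shorter tuple is smaller on a tie)
def pvLexLt : List Int → List Int → Bool
  | [], [] => false
  | [], _ :: _ => true
  | _ :: _, [] => false
  | a :: as, b :: bs => decide (a < b) || (a == b && pvLexLt as bs)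

-- stripped.startswith("## [") and "]" in stripped
def pvIsHeader (line : List Char) : Bool :=
  let s := PySem.Chars.strip line
  PySem.Chars.startswith s ['#', '#', ' ', '['] && PySem.Chars.isIn [']'] s

-- _semver_tuple(stripped[4:stripped.index("]")]); ']' is present, so index == find and never raises
def pvHeaderVer (line : List Char) : List Int :=
  let s := PySem.Chars.strip line
  pvSemver (PySem.List.slice s (some 4) (some (PySem.Chars.find s [']'])))

-- keep = (ver_t >= since_t) if inclusive else (ver_t > since_t), with Python tuple comparison
def pvKeep (sinceT : List Int) (inclusive : Bool) (line : List Char) : Bool :=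
  if inclusive then !pvLexLt (pvHeaderVer line) sinceT else pvLexLt sinceT (pvHeaderVer line)

-- A's for-loop: state = in_header_block flag; collects result_lines, break = return []
def pvLoopA (sinceT : List Int) (inclusive : Bool) : List (List Char) → Bool → List (List Char)
  | [], _ => []
  | line :: ls, inHeader =>
    if pvIsHeader line then
      if pvKeep sinceT inclusive line then line :: pvLoopA sinceT inclusive ls false
      else []
    else if inHeader then pvLoopA sinceT inclusive ls true
    else line :: pvLoopA sinceT inclusive ls false

def slice_since_py (content : String) (since : String) (inclusive : Bool) : String :=
  if since.toList = [] then content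
  else
    String.ofList (PySem.Chars.strip (List.flatten
      (pvLoopA (pvSemver since.toList) inclusive (pvSplitKeep content.toList []) true)))

-- ===== PORT B =====
-- _header_version: version tuple of a '## [...]' header line, None otherwise
def pvHdrVer? (line : List Char) : Option (List Int) :=
  let s := PySem.Chars.strip line
  if PySem.Chars.startswith s ['#', '#', ' ', '['] && PySem.Chars.isIn [']'] s then
    some (pvSemver (PySem.List.slice s (some 4) (some (PySem.Chars.find s [']']))))
  else none

-- _cmp: three-way lexicographic comparison of int tuples (zip pass, then length tiebreak)
def pvCmp : List Int → List Int → Ordering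
  | [], [] => .eq
  | [], _ :: _ => .lt
  | _ :: _, [] => .gt
  | a :: as, b :: bs => if a < b then .lt else if b < a then .gt else pvCmp as bs

-- _drop_preamble: peel lines off the front while they are not headers
def pvDropPre : List (List Char) → List (List Char)
  | [] => []
  | l :: ls => if (pvHdrVer? l).isNone then pvDropPre ls else l :: ls

-- _take_while_kept: collect lines, breaking at the first header that fails the cutoff
def pvTakeKept (cut : List Int) (inclusive : Bool) : List (List Char) → List (List Char)
  | [] => []
  | l :: ls =>
    match pvHdrVer? l with
    | some v =>
      if (if inclusive then pvCmp v cut = .lt else pvCmp v cut ≠ .gt) then []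
      else l :: pvTakeKept cut inclusive ls
    | none => l :: pvTakeKept cut inclusive ls

def slice_since_py_alt (content : String) (since : String) (inclusive : Bool) : String :=
  if since.toList = [] then content
  else
    String.ofList (PySem.Chars.strip (List.flatten
      (pvTakeKept (pvSemver since.toList) inclusive
        (pvDropPre (pvSplitKeep content.toList [])))))

-- ===== PRECONDITION & SPEC =====
def Spec_slice_since_py (content : String) (since : String) (inclusive : Bool) (out : String) : Prop := out = slice_since_py_alt content since inclusive
instance (content : String) (since : String) (inclusive : Bool) (out : String) : Decidable (Spec_slice_since_py content since inclusive out) := by unfold Spec_slice_since_py; infer_instance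

-- ===== CLAIM (what is proved, stated in full; the proofs are below) =====
def Claim_equal_slice_since_py : Prop := ∀ (content : String) (since : String) (inclusive : Bool), Dom_slice_since_py content since inclusive → Spec_slice_since_py content since inclusive (slice_since_py content since inclusive)

-- ===== LEMMAS AND PROOFS =====

-- pvHdrVer? is some exactly on header lines, and then carries pvHeaderVer's value
theorem pvHdrVer?_isSome (l : List Char) : (pvHdrVer? l).isSome = pvIsHeader l := by
  simp only [pvHdrVer?, pvIsHeader]
  split <;> simp_all

theorem pvHdrVer?_of_header (l : List Char) (h : pvIsHeader l = true) :
    pvHdrVer? l = some (pvHeaderVer l) := by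
  unfold pvIsHeader at h
  unfold pvHdrVer? pvHeaderVer
  simp only [h, if_pos]

-- three-way comparison vs Python's tuple `<`
theorem pvCmp_lt : ∀ a b : List Int, (pvCmp a b = .lt) ↔ pvLexLt a b = true := by
  intro a
  induction a with
  | nil => intro b; cases b <;> simp [pvCmp, pvLexLt]
  | cons x xs ih =>
    intro b
    cases b with
    | nil => simp [pvCmp, pvLexLt]
    | cons y ys =>
      simp only [pvCmp, pvLexLt]
      split_ifs with h1 h2
      · simp [h1]
      · simp [Int.lt_iff_le_and_ne] at h1 h2
        simp; omega
      · have hxy : x = y := le_antisymm (not_lt.mp h2) (not_lt.mp h1)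
        simp [hxy, ih]

theorem pvCmp_gt : ∀ a b : List Int, (pvCmp a b = .gt) ↔ pvLexLt b a = true := by
  intro a
  induction a with
  | nil => intro b; cases b <;> simp [pvCmp, pvLexLt]
  | cons x xs ih =>
    intro b
    cases b with
    | nil => simp [pvCmp, pvLexLt]
    | cons y ys =>
      simp only [pvCmp, pvLexLt]
      split_ifs with h1 h2
      · simp; omega
      · simp [h2]
      · have hxy : x = y := le_antisymm (not_lt.mp h2) (not_lt.mp h1)
        simp [hxy, ih]

-- B's break condition is the negation of A's keep, on header lines
theorem pvFail_eq_not_keep (T : List Int) (inc : Bool) (l : List Char) :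
    (if inc then pvCmp (pvHeaderVer l) T = .lt else pvCmp (pvHeaderVer l) T ≠ .gt) ↔
      pvKeep T inc l = false := by
  unfold pvKeep
  cases inc <;> simp [pvCmp_lt, pvCmp_gt]

-- with in_header_block = False, A's loop is exactly B's take-until-failing pass
theorem pvLoopA_false_eq_takeKept (T : List Int) (inc : Bool) :
    ∀ ls : List (List Char), pvLoopA T inc ls false = pvTakeKept T inc ls := by
  intro ls
  induction ls with
  | nil => rfl
  | cons l ls ih =>
    by_cases h : pvIsHeader l
    · rw [pvLoopA, pvTakeKept, pvHdrVer?_of_header l h]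
      by_cases hk : pvKeep T inc l
      · have : ¬ (if inc then pvCmp (pvHeaderVer l) T = .lt else pvCmp (pvHeaderVer l) T ≠ .gt) := by
          rw [pvFail_eq_not_keep T inc l]; simp [hk]
        simp [h, hk, this, ih]
      · have : (if inc then pvCmp (pvHeaderVer l) T = .lt else pvCmp (pvHeaderVer l) T ≠ .gt) := by
          rw [pvFail_eq_not_keep T inc l]; simpa using hk
        simp [h, hk, this]
    · have hno : pvHdrVer? l = none := by
        have := pvHdrVer?_isSome l
        cases hv : pvHdrVer? l
        · rfl
        · rw [hv] at this; simp [h] at this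
      rw [pvLoopA, pvTakeKept, hno]
      simp [h, ih]

-- with in_header_block = True, A's loop is B's two staged passes
theorem pvLoopA_true_eq_staged (T : List Int) (inc : Bool) :
    ∀ ls : List (List Char), pvLoopA T inc ls true = pvTakeKept T inc (pvDropPre ls) := by
  intro ls
  induction ls with
  | nil => rfl
  | cons l ls ih =>
    by_cases h : pvIsHeader l
    · have hsome : (pvHdrVer? l).isNone = false := by
        simp [Option.isNone_iff_eq_none, ← Option.not_isSome_iff_eq_none, pvHdrVer?_isSome, h]
      rw [pvDropPre, hsome]
      simp only [Bool.false_eq_true, if_false]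
      rw [← pvLoopA_false_eq_takeKept T inc (l :: ls)]
      simp [pvLoopA, h]
    · have hnone : (pvHdrVer? l).isNone = true := by
        simp [Option.isNone_iff_eq_none, ← Option.not_isSome_iff_eq_none, pvHdrVer?_isSome, h]
      rw [pvDropPre, hnone]
      simp only [if_pos]
      rw [← ih]
      simp [pvLoopA, h]

-- ===== VERDICT (by name: the statement is the Claim_ definition above) =====
theorem slice_since_py_spec : Claim_equal_slice_since_py := by
  intro content since inclusive _
  unfold Spec_slice_since_py slice_since_py slice_since_py_alt
  by_cases hs : since.toList = []
  · simp [hs]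
  · simp only [hs, if_false]
    rw [pvLoopA_true_eq_staged]
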